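-- pv_equiv track=rewrite | github.com/dheerajthodupunoori/problem-solving | indeed-karat/complete_hand.py | complete_hand
-- ===== SOURCE A (Python) =====
-- def complete_hand(tile):
--     tile_count = {}
--     pair_count = 0
--     for t in tile:
--         if t not in tile_count:
--             tile_count[t] = 1
--         else:
--             tile_count[t] += 1
--     for tile_count_map in tile_count:
--         if tile_count[tile_count_map] == 2:
--             pair_count += 1
--         elif tile_count[tile_count_map] < 2:
--             return False
--         elif tile_count[tile_count_map] > 3:
--             temp_tile_count = tile_count[tile_count_map]
--             if temp_tile_count % 3 == 2:
--                 pair_count += 1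
--             elif 2 > temp_tile_count % 3 > 0:
--                 return False
--     if pair_count > 1 or pair_count == 0:
--         return False
--     return True
-- ===== SOURCE B (Python) =====
-- def complete_hand(tile):
--     s = sorted(tile)
--     pairs = 0
--     while s:
--         k = 1
--         while k < len(s) and s[k] == s[0]:
--             k += 1
--         r = k % 3
--         if r == 1:
--             return False
--         if r == 2:
--             pairs += 1
--         s = s[k:]
--     return pairs == 1
-- ===== Notes on version B (the rewrite author's own statement) =====
-- stated objective: alternative
-- what changed: B drops A's dictionary entirely: it sorts the hand and scans it once, measuring each maximal run of equal tiles in place and deciding by r = run_length % 3 (1 -> fail, 2 -> one pair needed), instead of A's build-a-count-dict pass followed by a four-branch check over the dict's values.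
import Mathlib
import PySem

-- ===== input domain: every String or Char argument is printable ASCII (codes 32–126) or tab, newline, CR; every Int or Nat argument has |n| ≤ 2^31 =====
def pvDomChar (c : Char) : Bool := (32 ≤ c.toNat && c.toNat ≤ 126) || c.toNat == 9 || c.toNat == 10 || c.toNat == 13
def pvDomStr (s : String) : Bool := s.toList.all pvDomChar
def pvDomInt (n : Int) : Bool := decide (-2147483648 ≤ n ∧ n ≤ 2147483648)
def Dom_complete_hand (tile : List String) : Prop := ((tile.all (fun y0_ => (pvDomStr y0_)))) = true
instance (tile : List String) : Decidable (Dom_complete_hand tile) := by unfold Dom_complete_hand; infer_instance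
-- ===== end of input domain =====

-- B replaces A's count-dictionary and four-branch value check by a sort followed by one
-- run-length scan deciding each run by its length mod 3; objective: alternative.

-- ===== PORT A =====
-- first loop of A: build tile_count with the 'not in' guard
def chBuildA (tile : List String) : PySem.Dict String Int :=
  tile.foldl (fun d t =>
    if d.contains t = false then d.insert t 1
    else d.insert t (d.getD t 0 + 1)) PySem.Dict.empty

-- second loop of A: iterate the dict's keys, looking each count up, with early returns
def chLoopA (d : PySem.Dict String Int) : List String → Int → Bool
  | [], pair_count => if pair_count > 1 ∨ pair_count = 0 then false else true
  | k :: ks, pair_count =>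
    let c := d.getD k 0
    if c = 2 then chLoopA d ks (pair_count + 1)
    else if c < 2 then false
    else if c > 3 then
      let temp := c
      if PySem.Int.mod temp 3 = 2 then chLoopA d ks (pair_count + 1)
      else if 2 > PySem.Int.mod temp 3 ∧ PySem.Int.mod temp 3 > 0 then false
      else chLoopA d ks pair_count
    else chLoopA d ks pair_count

def complete_hand (tile : List String) : Bool :=
  let tile_count := chBuildA tile
  chLoopA tile_count tile_count.keys 0

-- ===== PORT B =====
-- B's inner while: count how many further leading elements equal the run's head
def chRunLen (h : String) : List String → Int
  | [] => 0
  | x :: xs => if x = h then 1 + chRunLen h xs else 0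

-- the slice s[k:] that removes the current run
def chDropRun (h : String) : List String → List String
  | [] => []
  | x :: xs => if x = h then chDropRun h xs else x :: xs

theorem chDropRun_sublist (h : String) (xs : List String) : (chDropRun h xs).Sublist xs := by
  induction xs with
  | nil => simp [chDropRun]
  | cons x xs ih =>
    by_cases hx : x = h
    · simpa [chDropRun, hx] using ih.cons _
    · simp [chDropRun, hx]

-- B's outer while over the sorted list
def chScan : List String → Int → Bool
  | [], pairs => pairs == 1
  | x :: xs, pairs =>
    let k : Int := 1 + chRunLen x xs
    let r := PySem.Int.mod k 3
    if r = 1 then false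
    else if r = 2 then chScan (chDropRun x xs) (pairs + 1)
    else chScan (chDropRun x xs) pairs
termination_by s _ => s.length
decreasing_by all_goals
  exact Nat.lt_succ_of_le (chDropRun_sublist _ _).length_le

def complete_hand_alt (tile : List String) : Bool :=
  chScan (PySem.List.sorted tile (fun x => x) false) 0

-- ===== PRECONDITION & SPEC =====
def Spec_complete_hand (tile : List String) (out : Bool) : Prop := out = complete_hand_alt tile
instance (tile : List String) (out : Bool) : Decidable (Spec_complete_hand tile out) := by unfold Spec_complete_hand; infer_instance

-- ===== CLAIM (what is proved, stated in full; the proofs are below) =====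
def Claim_equal_complete_hand : Prop := ∀ (tile : List String), Dom_complete_hand tile → Spec_complete_hand tile (complete_hand tile)

-- ===== LEMMAS AND PROOFS =====

-- proof helper: the decision both programs make, as a function of the list of counts
def pvF : List Int → Int → Bool
  | [], pairs => pairs == 1
  | c :: cs, pairs =>
    if c % 3 = 1 then false
    else if c % 3 = 2 then pvF cs (pairs + 1)
    else pvF cs pairs

theorem pvF_char (l : List Int) (p : Int) :
    pvF l p = if l.any (fun c => c % 3 == 1) then false
              else (p + (l.countP (fun c => c % 3 == 2) : Int) == 1) := by
  induction l generalizing p with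
  | nil => simp [pvF]
  | cons c cs ih =>
    simp only [pvF, List.any_cons, List.countP_cons]
    by_cases h1 : c % 3 = 1
    · simp [h1]
    · by_cases h2 : c % 3 = 2
      · by_cases h3 : cs.any (fun c => c % 3 == 1) = true
        · simp [h3, ih]
        · simp [h2, h3, ih]
          constructor <;> intro h <;> push_cast at * <;> omega
      · by_cases h3 : cs.any (fun c => c % 3 == 1) = true
        · simp [h1, h2, h3, ih]
        · simp [h1, h2, h3, ih]

theorem pvF_perm {l l' : List Int} (h : l.Perm l') (p : Int) : pvF l p = pvF l' p := by
  rw [pvF_char, pvF_char, h.any_eq, h.countP_eq]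

theorem chBuild_eq_counter (tile : List String) :
    chBuildA tile = PySem.Dict.counter tile := by
  rw [← PySem.Dict.foldl_insert_getD_add_one_eq_counter]
  unfold chBuildA
  congr 1
  funext d t
  by_cases h : d.contains t = false
  · have hg : d.getD t 0 = 0 := PySem.Dict.getD_of_not_contains (d := d) (k := t) (d0 := 0) h
    simp [h, hg]
  · simp [h]

theorem chLoopA_eq_pvF (d : PySem.Dict String Int) (ks : List String) (pc : Int)
    (hpc : 0 ≤ pc) (hval : ∀ k ∈ ks, 1 ≤ d.getD k 0) :
    chLoopA d ks pc = pvF (ks.map (fun k => d.getD k 0)) pc := by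
  induction ks generalizing pc with
  | nil =>
      simp only [chLoopA, pvF, List.map_nil]
      split
      · rename_i h
        have h1 : pc ≠ 1 := by omega
        simp [h1]
      · rename_i h
        have h1 : pc = 1 := by omega
        simp [h1]
  | cons k ks ih =>
      have hrest : ∀ k' ∈ ks, 1 ≤ d.getD k' 0 := fun k' h => hval k' (by simp [h])
      simp only [chLoopA, pvF, List.map_cons]
      obtain ⟨c, hc⟩ : ∃ c, d.getD k 0 = c := ⟨_, rfl⟩
      rw [hc]
      have hk : 1 ≤ c := hc ▸ hval k (by simp)
      rw [PySem.Int.mod_eq_emod_of_pos (by norm_num : (0:Int) < 3)]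
      by_cases h2 : c = 2
      · subst h2
        norm_num [ih (pc + 1) (by omega) hrest]
      · by_cases hlt : c < 2
        · have hc1 : c = 1 := by omega
          subst hc1
          norm_num
        · by_cases hgt : 3 < c
          · have hb0 : 0 ≤ c % 3 := Int.emod_nonneg c (by norm_num)
            have hb3 : c % 3 < 3 := Int.emod_lt_of_pos c (by norm_num)
            interval_cases h : (c % 3)
            · simp [h2, hlt, hgt, ih pc hpc hrest]
            · simp [h2, hlt, hgt]
            · simp [h2, hlt, hgt, ih (pc + 1) (by omega) hrest]
          · have hc3 : c = 3 := by omega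
            norm_num [hc3, ih pc hpc hrest]

-- run structure of a sorted (Pairwise ≤) list: the leading run holds every copy of the head
theorem chRun_split (x : String) (xs : List String)
    (hp : (x :: xs).Pairwise (· ≤ ·)) :
    chRunLen x xs = (xs.count x : Int) ∧ x ∉ chDropRun x xs := by
  induction xs with
  | nil => simp [chRunLen, chDropRun]
  | cons a as ih =>
    rcases List.pairwise_cons.1 hp with ⟨hx, hpas⟩
    by_cases hax : a = x
    · subst hax
      have hp' : (a :: as).Pairwise (· ≤ ·) := hpas
      rcases ih hp' with ⟨h1, h2⟩
      constructor
      · simp [chRunLen, h1]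
        ring
      · simpa [chDropRun] using h2
    · have hxa : x ≤ a := hx a (by simp)
      have hxnot : x ∉ a :: as := by
        intro hmem
        rcases List.mem_cons.1 hmem with h | h
        · exact hax h.symm
        · rcases List.pairwise_cons.1 hpas with ⟨ha, _⟩
          exact hax (le_antisymm (ha x h) hxa)
      constructor
      · simp [chRunLen, hax, List.count_eq_zero.2 hxnot]
      · simpa [chDropRun, hax] using hxnot

theorem count_chDropRun (x y : String) (xs : List String) (hyx : y ≠ x) :
    (chDropRun x xs).count y = xs.count y := by
  induction xs with
  | nil => simp [chDropRun]
  | cons a as ih =>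
    by_cases hax : a = x
    · subst hax
      simp [chDropRun, ih, hyx.symm]
    · simp [chDropRun, hax]

theorem mem_of_mem_chDropRun {x y : String} {xs : List String}
    (h : y ∈ chDropRun x xs) : y ∈ xs :=
  (chDropRun_sublist x xs).mem h

theorem mem_chDropRun_of_mem {x y : String} {xs : List String} (h : y ∈ xs) :
    y = x ∨ y ∈ chDropRun x xs := by
  induction xs with
  | nil => cases h
  | cons a as ih =>
    by_cases hax : a = x
    · rcases List.mem_cons.1 h with h' | h'
      · exact Or.inl (h'.trans hax)
      · simpa [chDropRun, hax] using ih h'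
    · simp [chDropRun, hax, h]

theorem mem_cons_iff_chDropRun (x : String) (xs : List String) (y : String) :
    y ∈ x :: xs ↔ y = x ∨ y ∈ chDropRun x xs := by
  constructor
  · intro h
    rcases List.mem_cons.1 h with h | h
    · exact Or.inl h
    · exact mem_chDropRun_of_mem h
  · rintro (rfl | h)
    · simp
    · exact List.mem_cons_of_mem _ (mem_of_mem_chDropRun h)

-- B's scan computes pvF over the per-distinct-tile counts of the sorted list
theorem chScan_eq_pvF (s : List String) (p : Int)
    (hp : s.Pairwise (· ≤ ·)) :
    chScan s p = pvF ((PySem.Set.ofList s).map (fun k => (s.count k : Int))) p := by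
  induction hn : s.length using Nat.strong_induction_on generalizing s p with
  | _ n ih =>
    cases s with
    | nil => simp [chScan, pvF, PySem.Set.ofList]
    | cons x xs =>
      rcases chRun_split x xs hp with ⟨hrun, hxnot⟩
      have hsub : (chDropRun x xs).Sublist xs := chDropRun_sublist x xs
      have hlen : (chDropRun x xs).length < n := by
        subst hn
        exact Nat.lt_succ_of_le hsub.length_le
      have hprest : (chDropRun x xs).Pairwise (· ≤ ·) :=
        (List.pairwise_cons.1 hp).2.sublist hsub
      have hnd1 : (PySem.Set.ofList (x :: xs)).Nodup := PySem.Set.nodup_ofList _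
      have hnd2 : (x :: PySem.Set.ofList (chDropRun x xs)).Nodup := by
        refine List.nodup_cons.2 ⟨?_, PySem.Set.nodup_ofList _⟩
        rw [PySem.Set.mem_ofList]
        exact hxnot
      have hperm : (PySem.Set.ofList (x :: xs)).Perm (x :: PySem.Set.ofList (chDropRun x xs)) := by
        rw [List.perm_ext_iff_of_nodup hnd1 hnd2]
        intro y
        rw [PySem.Set.mem_ofList, mem_cons_iff_chDropRun]
        simp [PySem.Set.mem_ofList]
      have hmapcongr : ∀ y ∈ PySem.Set.ofList (chDropRun x xs),
          ((chDropRun x xs).count y : Int) = ((x :: xs).count y : Int) := by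
        intro y hy
        have hyx : y ≠ x := fun h => hxnot (h ▸ (PySem.Set.mem_ofList (chDropRun x xs) y).1 hy)
        simp [count_chDropRun x y xs hyx, Ne.symm hyx]
      have hcx : ((x :: xs).count x : Int) = 1 + chRunLen x xs := by
        rw [List.count_cons_self, hrun]
        push_cast
        ring
      calc chScan (x :: xs) p
          = pvF (((x :: xs).count x : Int) :: (PySem.Set.ofList (chDropRun x xs)).map
              (fun k => ((chDropRun x xs).count k : Int))) p := by
            simp only [chScan, pvF, hcx,
              PySem.Int.mod_eq_emod_of_pos (by norm_num : (0:Int) < 3)]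
            split
            · rfl
            · split
              · exact ih _ hlen _ (p + 1) hprest rfl
              · exact ih _ hlen _ p hprest rfl
        _ = pvF ((x :: PySem.Set.ofList (chDropRun x xs)).map
              (fun k => ((x :: xs).count k : Int))) p := by
            simp only [List.map_cons]
            rw [List.map_congr_left hmapcongr]
        _ = pvF ((PySem.Set.ofList (x :: xs)).map (fun k => ((x :: xs).count k : Int))) p :=
            pvF_perm (hperm.map _).symm p

-- ===== VERDICT (by name: the statement is the Claim_ definition above) =====
theorem complete_hand_spec : Claim_equal_complete_hand := by
  intro tile _
  unfold Spec_complete_hand complete_hand complete_hand_alt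
  rw [chBuild_eq_counter]
  have hnd : (PySem.Dict.counter tile).keys.Nodup := PySem.Dict.nodup_keys_counter tile
  -- A's side as pvF over the counts of the distinct tiles
  have hA : chLoopA (PySem.Dict.counter tile) (PySem.Dict.counter tile).keys 0
      = pvF ((PySem.Set.ofList tile).map (fun k => (tile.count k : Int))) 0 := by
    rw [chLoopA_eq_pvF _ _ 0 le_rfl (by
      intro k hk
      rw [PySem.Dict.getD_counter]
      have hkmem : k ∈ tile := by
        have := PySem.Dict.keys_counter (xs := tile)
        rw [this] at hk
        exact (PySem.Set.mem_ofList tile k).1 hk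
      have := List.count_pos_iff.2 hkmem
      omega)]
    rw [PySem.Dict.keys_counter]
    congr 1
    exact List.map_congr_left (fun k _ => PySem.Dict.getD_counter ..)
  rw [hA]
  -- B's side
  set s := PySem.List.sorted tile (fun x => x) false with hs
  have hperm : s.Perm tile := PySem.List.sorted_perm ..
  have hpw : s.Pairwise (· ≤ ·) := by
    have := PySem.List.sorted_pairwise (xs := tile) (key := fun x : String => x)
    simpa using this
  rw [chScan_eq_pvF s 0 hpw]
  -- the two count lists are permutations of each other
  have hofp : (PySem.Set.ofList tile).Perm (PySem.Set.ofList s) := by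
    rw [List.perm_ext_iff_of_nodup (PySem.Set.nodup_ofList _) (PySem.Set.nodup_ofList _)]
    intro y
    rw [PySem.Set.mem_ofList, PySem.Set.mem_ofList, hperm.mem_iff]
  have hcnt : ∀ k ∈ PySem.Set.ofList tile, (tile.count k : Int) = (s.count k : Int) := by
    intro k _
    rw [hperm.count_eq]
  rw [List.map_congr_left hcnt]
  exact pvF_perm (hofp.map _) 0
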